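-- pv_equiv track=rewrite | github.com/Sobindra2005/Inventory-Management | backend/app/services/bill_extraction.py | _infer_columns_per_row
-- ===== SOURCE A (Python) =====
-- from collections import Counter
--
-- def _infer_columns_per_row(lines, start_idx, end_idx, default=5):
--     """Infer number of table columns from header + item lines."""
--     candidate_counts = []
--
--     # Header count is a strong signal when OCR detects it cleanly.
--     if start_idx is not None and 0 <= start_idx < len(lines):
--         header_count = len(lines[start_idx]["words"])
--         if header_count >= 2:
--             candidate_counts.append(header_count)
--
--     if start_idx is not None and end_idx is not None and end_idx > start_idx:
--         selected_lines = lines[start_idx + 1 : end_idx]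
--     elif start_idx is not None:
--         selected_lines = lines[start_idx + 1 :]
--     else:
--         selected_lines = lines
--
--     for line in selected_lines:
--         count = len(line["words"])
--         if count >= 2:
--             candidate_counts.append(count)
--
--     if not candidate_counts:
--         return default
--
--     # Use the most frequent count. Tie-breaker prefers larger count.
--     count_frequency = Counter(candidate_counts)
--     return max(count_frequency.items(), key=lambda item: (item[1], item[0]))[0]
-- ===== SOURCE B (Python) =====
-- def _infer_columns_per_row(lines, start_idx, end_idx, default=5):
--     """Infer number of table columns from header + item lines."""
--     if start_idx is not None and end_idx is not None and end_idx > start_idx: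
--         selected_lines = lines[start_idx + 1 : end_idx]
--     elif start_idx is not None:
--         selected_lines = lines[start_idx + 1 :]
--     else:
--         selected_lines = lines
--
--     candidates = []
--     if start_idx is not None and 0 <= start_idx < len(lines):
--         header_count = len(lines[start_idx]["words"])
--         if header_count >= 2:
--             candidates.append(header_count)
--     candidates.extend(c for line in selected_lines
--                       if (c := len(line["words"])) >= 2)
--
--     if not candidates:
--         return default
--
--     # Mode by a sorted run scan: sort descending, track the longest run of
--     # equal values; on equal run lengths the earlier (larger) value is kept.
--     candidates.sort(reverse=True)
--     best_val = cur_val = candidates[0]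
--     best_run = cur_run = 1
--     for v in candidates[1:]:
--         if v == cur_val:
--             cur_run += 1
--         else:
--             cur_val = v
--             cur_run = 1
--         if cur_run > best_run:
--             best_run = cur_run
--             best_val = cur_val
--     return best_val
-- ===== Notes on version B (the rewrite author's own statement) =====
-- stated objective: alternative
-- what changed: The Counter-based mode with max(items, key=(freq, count)) is replaced by a sort-based mode: sort the candidate counts descending and scan consecutive equal runs, keeping the longest run (strictly-longer to win, so on equal frequency the larger value, seen first, is kept).
import Mathlib
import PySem

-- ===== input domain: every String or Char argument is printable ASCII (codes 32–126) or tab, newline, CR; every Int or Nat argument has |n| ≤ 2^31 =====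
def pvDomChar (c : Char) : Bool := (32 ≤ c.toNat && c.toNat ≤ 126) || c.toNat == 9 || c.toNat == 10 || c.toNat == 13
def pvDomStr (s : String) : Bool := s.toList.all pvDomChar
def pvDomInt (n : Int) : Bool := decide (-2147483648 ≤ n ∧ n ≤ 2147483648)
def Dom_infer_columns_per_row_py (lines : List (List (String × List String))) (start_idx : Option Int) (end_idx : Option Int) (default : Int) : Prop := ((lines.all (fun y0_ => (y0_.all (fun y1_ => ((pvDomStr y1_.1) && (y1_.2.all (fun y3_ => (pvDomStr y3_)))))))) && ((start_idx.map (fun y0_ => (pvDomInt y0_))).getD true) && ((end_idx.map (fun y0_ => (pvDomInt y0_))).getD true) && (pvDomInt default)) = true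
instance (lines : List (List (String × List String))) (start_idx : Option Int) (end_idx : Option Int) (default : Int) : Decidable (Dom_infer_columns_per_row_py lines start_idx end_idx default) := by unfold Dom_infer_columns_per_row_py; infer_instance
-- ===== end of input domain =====

-- B replaces Counter + max(key=(freq,count)) by a descending sort and a longest-run scan (objective: alternative);
-- inputs on which Python A raises KeyError are excluded by Pre_.

-- ===== PORT A =====
-- len(line["words"]) with line["words"] looked up as a dict (first match); exact whenever the key is present (Pre_)
def pvWordsLen (line : List (String × List String)) : Int :=
  ((PySem.Dict.mk line).getD "words" []).length

-- the header candidate list: [header_count] when start_idx is in range and the count is >= 2 (identical code in A and B)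
def pvHeaderCand (lines : List (List (String × List String))) (start_idx : Option Int) : List Int :=
  match start_idx with
  | none => []
  | some s =>
    if 0 ≤ s ∧ s < (lines.length : Int) then
      let header_count := pvWordsLen ((PySem.List.pyGet? lines s).getD [])
      if 2 ≤ header_count then [header_count] else []
    else []

-- the selected_lines slice chain (identical code in A and B)
def pvSelected (lines : List (List (String × List String))) (start_idx : Option Int) (end_idx : Option Int) :
    List (List (String × List String)) :=
  match start_idx, end_idx with
  | some s, some e =>
      if s < e then PySem.List.slice lines (some (s + 1)) (some e)
      else PySem.List.slice lines (some (s + 1)) none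
  | some s, none => PySem.List.slice lines (some (s + 1)) none
  | none, _ => lines

def infer_columns_per_row_py (lines : List (List (String × List String))) (start_idx : Option Int) (end_idx : Option Int) (default : Int) : Int :=
  let candidate_counts :=
    (pvSelected lines start_idx end_idx).foldl
      (fun acc line =>
        let count := pvWordsLen line
        if 2 ≤ count then acc ++ [count] else acc)
      (pvHeaderCand lines start_idx)
  if candidate_counts = [] then default
  else
    match PySem.List.max2? (PySem.Dict.counter candidate_counts).items (fun it => it.2) (fun it => it.1) with
    | some it => it.1
    | none => default

-- ===== PORT B =====
-- the for-loop body of Source B's run scan: extend/reset the current run, then take it over as best if strictly longer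
def pvScanStep (st : Int × Int × Int × Int) (v : Int) : Int × Int × Int × Int :=
  let cvcr := if v = st.2.2.1 then (st.2.2.1, st.2.2.2 + 1) else (v, 1)
  if st.2.1 < cvcr.2 then (cvcr.1, cvcr.2, cvcr.1, cvcr.2) else (st.1, st.2.1, cvcr.1, cvcr.2)

def infer_columns_per_row_py_alt (lines : List (List (String × List String))) (start_idx : Option Int) (end_idx : Option Int) (default : Int) : Int :=
  let candidates :=
    pvHeaderCand lines start_idx ++
      (pvSelected lines start_idx end_idx).filterMap
        (fun line => let c := pvWordsLen line; if 2 ≤ c then some c else none)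
  match PySem.List.sorted candidates (fun x => x) true with
  | [] => default
  | c0 :: rest => (rest.foldl pvScanStep (c0, 1, c0, 1)).1

-- ===== PRECONDITION & SPEC =====
def pvHasWords (line : List (String × List String)) : Prop := "words" ∈ line.map Prod.fst

-- Pre_ excludes exactly the inputs on which Python A raises KeyError: an accessed line (the in-range header
-- line, or a line of the selected slice) whose dict has no "words" key.
def Pre_infer_columns_per_row_py (lines : List (List (String × List String))) (start_idx : Option Int) (end_idx : Option Int) (default : Int) : Prop :=
  (∀ s ∈ start_idx.toList, 0 ≤ s → s < (lines.length : Int) →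
      pvHasWords ((PySem.List.pyGet? lines s).getD [])) ∧
  (∀ line ∈ pvSelected lines start_idx end_idx, pvHasWords line)
instance (lines : List (List (String × List String))) (start_idx : Option Int) (end_idx : Option Int) (default : Int) : Decidable (Pre_infer_columns_per_row_py lines start_idx end_idx default) := by unfold Pre_infer_columns_per_row_py pvHasWords; infer_instance

def pvWitness_infer_columns_per_row_py : (List (List (String × List String))) × Option Int × Option Int × Int :=
  ([[("words", ["qty", "price"])], [("words", ["a", "b", "c"])]], some 0, none, 5)

def Spec_infer_columns_per_row_py (lines : List (List (String × List String))) (start_idx : Option Int) (end_idx : Option Int) (default : Int) (out : Int) : Prop := out = infer_columns_per_row_py_alt lines start_idx end_idx default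
instance (lines : List (List (String × List String))) (start_idx : Option Int) (end_idx : Option Int) (default : Int) (out : Int) : Decidable (Spec_infer_columns_per_row_py lines start_idx end_idx default out) := by unfold Spec_infer_columns_per_row_py; infer_instance

-- ===== CLAIM (what is proved, stated in full; the proofs are below) =====
def Claim_equal_infer_columns_per_row_py : Prop := ∀ (lines : List (List (String × List String))) (start_idx : Option Int) (end_idx : Option Int) (default : Int), Dom_infer_columns_per_row_py lines start_idx end_idx default → Pre_infer_columns_per_row_py lines start_idx end_idx default → Spec_infer_columns_per_row_py lines start_idx end_idx default (infer_columns_per_row_py lines start_idx end_idx default)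

-- ===== LEMMAS AND PROOFS =====

-- the strict mode with larger-value tie-break: what both programs compute on a nonempty candidate list
def pvIsMode (l : List Int) (r : Int) : Prop :=
  r ∈ l ∧ ∀ w ∈ l, l.count w < l.count r ∨ (l.count w = l.count r ∧ w ≤ r)

lemma pvIsMode_unique {l : List Int} {r₁ r₂ : Int} (h₁ : pvIsMode l r₁) (h₂ : pvIsMode l r₂) : r₁ = r₂ := by
  obtain ⟨m₁, p₁⟩ := h₁
  obtain ⟨m₂, p₂⟩ := h₂
  have a := p₁ r₂ m₂
  have b := p₂ r₁ m₁
  omega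

lemma pvIsMode_perm {l₁ l₂ : List Int} {r : Int} (hp : l₁.Perm l₂) (h : pvIsMode l₁ r) : pvIsMode l₂ r := by
  obtain ⟨hm, hprop⟩ := h
  refine ⟨hp.mem_iff.mp hm, fun w hw => ?_⟩
  have := hprop w (hp.mem_iff.mpr hw)
  simpa [hp.count_eq] using this

-- A's candidate-collecting loop is the header list followed by the filtered counts
lemma pvCandA_eq (sel : List (List (String × List String))) :
    ∀ acc : List Int,
      sel.foldl (fun acc line => let count := pvWordsLen line; if 2 ≤ count then acc ++ [count] else acc) acc
        = acc ++ sel.filterMap (fun line => let c := pvWordsLen line; if 2 ≤ c then some c else none) := by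
  induction sel with
  | nil => simp
  | cons x t ih =>
    intro acc
    by_cases h : 2 ≤ pvWordsLen x <;> simp [List.foldl_cons, h, ih]

-- the foldl inside max2?, with Int-valued lexicographic keys, returns a lex-maximal element (first wins on ties)
lemma pv_foldl_max2 {α : Type} (k1 k2 : α → Int) (l : List α) : ∀ acc : α,
    ∃ m, List.foldl
        (fun acc x => match acc with
          | none => some x
          | some m => if (decide (k1 m < k1 x) || !decide (k1 x < k1 m) && decide (k2 m < k2 x)) = true then some x else some m)
        (some acc) l = some m
      ∧ (m = acc ∨ m ∈ l)
      ∧ (k1 acc < k1 m ∨ (k1 acc = k1 m ∧ k2 acc ≤ k2 m))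
      ∧ ∀ y ∈ l, k1 y < k1 m ∨ (k1 y = k1 m ∧ k2 y ≤ k2 m) := by
  induction l with
  | nil => intro acc; exact ⟨acc, rfl, Or.inl rfl, Or.inr ⟨rfl, le_refl _⟩, by simp⟩
  | cons x t ih =>
    intro acc
    by_cases h : (decide (k1 acc < k1 x) || !decide (k1 x < k1 acc) && decide (k2 acc < k2 x)) = true
    · obtain ⟨m, hm, hmem, hrel, hall⟩ := ih x
      have hfold : List.foldl
          (fun acc x => match acc with
            | none => some x
            | some m => if (decide (k1 m < k1 x) || !decide (k1 x < k1 m) && decide (k2 m < k2 x)) = true then some x else some m)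
          (some acc) (x :: t) = some m := by
        rw [List.foldl_cons]
        show List.foldl _ (if (decide (k1 acc < k1 x) || !decide (k1 x < k1 acc) && decide (k2 acc < k2 x)) = true then some x else some acc) t = some m
        rw [if_pos h]; exact hm
      simp only [Bool.or_eq_true, Bool.and_eq_true, decide_eq_true_eq, Bool.not_eq_true',
        decide_eq_false_iff_not] at h
      refine ⟨m, hfold, ?_, ?_, ?_⟩
      · rcases hmem with h' | h' <;> simp [h']
      · rcases h with h | ⟨h1, h2⟩ <;> rcases hrel with h' | ⟨h1', h2'⟩ <;> omega
      · intro y hy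
        rcases List.mem_cons.mp hy with rfl | hy
        · exact hrel
        · exact hall y hy
    · obtain ⟨m, hm, hmem, hrel, hall⟩ := ih acc
      have hfold : List.foldl
          (fun acc x => match acc with
            | none => some x
            | some m => if (decide (k1 m < k1 x) || !decide (k1 x < k1 m) && decide (k2 m < k2 x)) = true then some x else some m)
          (some acc) (x :: t) = some m := by
        rw [List.foldl_cons]
        show List.foldl _ (if (decide (k1 acc < k1 x) || !decide (k1 x < k1 acc) && decide (k2 acc < k2 x)) = true then some x else some acc) t = some m
        rw [if_neg h]; exact hm
      simp only [Bool.or_eq_true, Bool.and_eq_true, decide_eq_true_eq, Bool.not_eq_true',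
        decide_eq_false_iff_not, not_or, not_and_or, not_lt] at h
      refine ⟨m, hfold, ?_, hrel, ?_⟩
      · rcases hmem with h' | h' <;> simp [h']
      · intro y hy
        rcases List.mem_cons.mp hy with rfl | hy
        · rcases h with ⟨hle, h2⟩
          rcases hrel with h' | ⟨h1', h2'⟩ <;> rcases h2 with h2 | h2 <;> omega
        · exact hall y hy

lemma pv_max2?_spec {α : Type} (k1 k2 : α → Int) (x : α) (t : List α) :
    ∃ m, PySem.List.max2? (x :: t) k1 k2 = some m ∧ m ∈ (x :: t)
      ∧ ∀ y ∈ (x :: t), k1 y < k1 m ∨ (k1 y = k1 m ∧ k2 y ≤ k2 m) := by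
  obtain ⟨m, hm, hmem, hrel, hall⟩ := pv_foldl_max2 k1 k2 t x
  refine ⟨m, ?_, ?_, ?_⟩
  · simpa [PySem.List.max2?, List.foldl_cons] using hm
  · rcases hmem with h | h <;> simp [h]
  · intro y hy
    rcases List.mem_cons.mp hy with rfl | hy
    · exact hrel
    · exact hall y hy

-- A on a nonempty candidate list computes the mode
lemma pvA_mode (cand : List Int) (d : Int) (hne : cand ≠ []) :
    ∃ r, (match PySem.List.max2? (PySem.Dict.counter cand).items (fun it => it.2) (fun it => it.1) with
          | some it => it.1
          | none => d) = r ∧ pvIsMode cand r := by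
  have hitems : (PySem.Dict.counter cand).items
      = (PySem.Set.ofList cand).map (fun k => (k, (cand.count k : Int))) :=
    PySem.Dict.items_counter cand
  obtain ⟨c, hc⟩ := List.exists_mem_of_ne_nil cand hne
  have hcs : c ∈ PySem.Set.ofList cand := (PySem.Set.mem_ofList cand c).mpr hc
  obtain ⟨s0, st, hset⟩ : ∃ s0 st, PySem.Set.ofList cand = s0 :: st := by
    cases hS : PySem.Set.ofList cand with
    | nil => rw [hS] at hcs; simp at hcs
    | cons a b => exact ⟨a, b, rfl⟩
  rw [hitems, hset, List.map_cons]
  obtain ⟨m, hm, hmem, hall⟩ := pv_max2?_spec (fun it : Int × Int => it.2) (fun it => it.1)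
    (s0, (cand.count s0 : Int)) (st.map (fun k => (k, (cand.count k : Int))))
  rw [hm]
  have hmem' : m ∈ (s0 :: st).map (fun k => (k, (cand.count k : Int))) := by
    rw [List.map_cons]; exact hmem
  obtain ⟨k, hk, hkeq⟩ := List.mem_map.mp hmem'
  have hk' : k ∈ cand := (PySem.Set.mem_ofList cand k).mp (by rw [hset]; exact hk)
  refine ⟨m.1, rfl, ?_, ?_⟩
  · rw [← hkeq]; exact hk'
  · intro w hw
    have hwS : w ∈ (s0 :: st) := by rw [← hset]; exact (PySem.Set.mem_ofList cand w).mpr hw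
    have hwit : (w, (cand.count w : Int)) ∈ (s0 :: st).map (fun k => (k, (cand.count k : Int))) :=
      List.mem_map.mpr ⟨w, hwS, rfl⟩
    rw [List.map_cons] at hwit
    have hrel := hall _ hwit
    rw [← hkeq] at hrel ⊢
    simp only at hrel ⊢
    omega

-- the run scan over a descending list starting from a valid state computes the mode of prefix ++ rest
lemma pv_scan_spec (rest : List Int) : ∀ (p : List Int) (bv cv : Int),
    bv ∈ p → (∀ y ∈ p, cv ≤ y) →
    1 ≤ p.count bv →
    (∀ w ∈ p, p.count w < p.count bv ∨ (p.count w = p.count bv ∧ w ≤ bv)) →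
    (∀ x ∈ rest, x ≤ cv) → rest.Pairwise (fun a b => b ≤ a) →
    pvIsMode (p ++ rest)
      ((rest.foldl pvScanStep (bv, (p.count bv : Int), cv, (p.count cv : Int))).1) := by
  induction rest with
  | nil =>
    intro p bv cv hbv hmin hpos hmode _ _
    simpa [List.foldl_nil, pvIsMode] using ⟨hbv, hmode⟩
  | cons x t ih =>
    intro p bv cv hbv hmin hpos hmode hle hpw
    have hxcv : x ≤ cv := hle x List.mem_cons_self
    have htle : ∀ y ∈ t, y ≤ x := (List.pairwise_cons.mp hpw).1
    have htpw : t.Pairwise (fun a b : Int => b ≤ a) := (List.pairwise_cons.mp hpw).2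
    have hcvbv : cv ≤ bv := hmin bv hbv
    have happ : p ++ x :: t = (p ++ [x]) ++ t := by simp
    rw [List.foldl_cons, happ]
    by_cases hx : x = cv
    · -- the current run extends by one
      subst hx
      have hbvmem : bv ∈ p ++ [x] := List.mem_append.mpr (Or.inl hbv)
      have hxmem : x ∈ p ++ [x] := List.mem_append.mpr (Or.inr List.mem_cons_self)
      have hmin' : ∀ y ∈ p ++ [x], x ≤ y := by
        intro y hy
        rcases List.mem_append.mp hy with h | h
        · exact le_trans hxcv (hmin y h)
        · simp at h; omega
      have hcx : (p ++ [x]).count x = p.count x + 1 := by simp [List.count_append]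
      by_cases hgt : (p.count bv : Int) < (p.count x : Int) + 1
      · have hstep : pvScanStep (bv, (p.count bv : Int), x, (p.count x : Int)) x
            = (x, ((p ++ [x]).count x : Int), x, ((p ++ [x]).count x : Int)) := by
          simp only [pvScanStep, hcx]
          push_cast
          simp [hgt]
        rw [hstep]
        have hmode' : ∀ w ∈ p ++ [x], (p ++ [x]).count w < (p ++ [x]).count x ∨
            ((p ++ [x]).count w = (p ++ [x]).count x ∧ w ≤ x) := by
          intro w hw
          by_cases hwx : w = x
          · subst hwx; right; exact ⟨rfl, le_refl _⟩
          · have hwp : w ∈ p := by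
              rcases List.mem_append.mp hw with h | h
              · exact h
              · simp at h; omega
            have hcw : (p ++ [x]).count w = p.count w := by simp [List.count_append, List.count_cons, Ne.symm hwx]
            have := hmode w hwp
            left; omega
        exact ih (p ++ [x]) x x hxmem hmin' (by omega) hmode' htle htpw
      · have hbvx : bv ≠ x := by intro h; subst h; omega
        have hcbv : (p ++ [x]).count bv = p.count bv := by simp [List.count_append, List.count_cons, Ne.symm hbvx]
        have hstep : pvScanStep (bv, (p.count bv : Int), x, (p.count x : Int)) x
            = (bv, ((p ++ [x]).count bv : Int), x, ((p ++ [x]).count x : Int)) := by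
          simp only [pvScanStep, hcx, hcbv]
          push_cast
          simp [hgt]
        rw [hstep]
        have hmode' : ∀ w ∈ p ++ [x], (p ++ [x]).count w < (p ++ [x]).count bv ∨
            ((p ++ [x]).count w = (p ++ [x]).count bv ∧ w ≤ bv) := by
          intro w hw
          by_cases hwx : w = x
          · rw [hwx, hcbv, hcx]
            have h1 : p.count x + 1 ≤ p.count bv := by omega
            rcases lt_or_eq_of_le h1 with h | h
            · left; omega
            · right; exact ⟨h, hwx ▸ hcvbv⟩
          · have hwp : w ∈ p := by
              rcases List.mem_append.mp hw with h | h
              · exact h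
              · simp at h; omega
            have hcw : (p ++ [x]).count w = p.count w := by simp [List.count_append, List.count_cons, Ne.symm hwx]
            rw [hcw, hcbv]; exact hmode w hwp
        exact ih (p ++ [x]) bv x hbvmem hmin' (by omega) hmode' htle htpw
    · -- a new, strictly smaller value starts a run of length 1
      have hxlt : x < cv := lt_of_le_of_ne hxcv hx
      have hxnp : x ∉ p := fun h => absurd (hmin x h) (by omega)
      have hbvx : bv ≠ x := fun h => hxnp (h ▸ hbv)
      have hbvmem : bv ∈ p ++ [x] := List.mem_append.mpr (Or.inl hbv)
      have hcbv : (p ++ [x]).count bv = p.count bv := by simp [List.count_append, List.count_cons, Ne.symm hbvx]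
      have hcx : (p ++ [x]).count x = 1 := by
        simp [List.count_append, List.count_eq_zero.mpr hxnp]
      have hstep : pvScanStep (bv, (p.count bv : Int), cv, (p.count cv : Int)) x
          = (bv, ((p ++ [x]).count bv : Int), x, ((p ++ [x]).count x : Int)) := by
        rw [hcbv, hcx]
        have h1 : ¬ ((p.count bv : Int) < 1) := by omega
        simp [pvScanStep, hx, h1]
      rw [hstep]
      have hmin' : ∀ y ∈ p ++ [x], x ≤ y := by
        intro y hy
        rcases List.mem_append.mp hy with h | h
        · exact le_of_lt (lt_of_lt_of_le hxlt (hmin y h))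
        · simp at h; omega
      have hmode' : ∀ w ∈ p ++ [x], (p ++ [x]).count w < (p ++ [x]).count bv ∨
          ((p ++ [x]).count w = (p ++ [x]).count bv ∧ w ≤ bv) := by
        intro w hw
        by_cases hwx : w = x
        · subst hwx
          rw [hcbv, hcx]
          rcases lt_or_eq_of_le hpos with h | h
          · left; omega
          · right; refine ⟨by omega, ?_⟩
            exact le_trans (le_of_lt hxlt) hcvbv
        · have hwp : w ∈ p := by
            rcases List.mem_append.mp hw with h | h
            · exact h
            · simp at h; omega
          have hcw : (p ++ [x]).count w = p.count w := by simp [List.count_append, List.count_cons, Ne.symm hwx]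
          rw [hcw, hcbv]; exact hmode w hwp
      exact ih (p ++ [x]) bv x hbvmem hmin' (by omega) hmode' htle htpw

-- B on a nonempty sorted candidate list computes the mode
lemma pvB_mode (cand : List Int) (c0 : Int) (rest : List Int)
    (hs : PySem.List.sorted cand (fun x => x) true = c0 :: rest) :
    pvIsMode cand ((rest.foldl pvScanStep (c0, 1, c0, 1)).1) := by
  have hperm : (c0 :: rest).Perm cand := hs ▸ PySem.List.sorted_perm cand (fun x => x) true
  have hpw : (c0 :: rest).Pairwise (fun a b : Int => (fun x => x) b ≤ (fun x => x) a) := by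
    rw [← hs]; exact PySem.List.sorted_pairwise_rev cand (fun x => x)
  have hpw' : (c0 :: rest).Pairwise (fun a b : Int => b ≤ a) := hpw
  have hc1 : ([c0] : List Int).count c0 = 1 := by simp
  have := pv_scan_spec rest [c0] c0 c0 (by simp) (by simp) (by simp)
    (by intro w hw; simp at hw; subst hw; right; exact ⟨rfl, le_refl _⟩)
    (List.pairwise_cons.mp hpw').1 (List.pairwise_cons.mp hpw').2
  rw [hc1] at this
  have hmode : pvIsMode ([c0] ++ rest) ((rest.foldl pvScanStep (c0, 1, c0, 1)).1) := by
    simpa using this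
  exact pvIsMode_perm (by simpa using hperm) hmode

-- ===== VERDICT (by name: the statement is the Claim_ definition above) =====
theorem infer_columns_per_row_py_spec : Claim_equal_infer_columns_per_row_py := by
  intro lines start_idx end_idx default _hdom _hpre
  unfold Spec_infer_columns_per_row_py infer_columns_per_row_py infer_columns_per_row_py_alt
  simp only [pvCandA_eq]
  set cand := pvHeaderCand lines start_idx ++
    (pvSelected lines start_idx end_idx).filterMap
      (fun line => let c := pvWordsLen line; if 2 ≤ c then some c else none) with hcand
  by_cases hne : cand = []
  · rw [if_pos hne]
    have : PySem.List.sorted cand (fun x => x) true = [] :=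
      (PySem.List.sorted_eq_nil_iff cand (fun x => x) true).mpr hne
    rw [this]
  · rw [if_neg hne]
    obtain ⟨c0, rest, hs⟩ : ∃ c0 rest, PySem.List.sorted cand (fun x => x) true = c0 :: rest := by
      cases h : PySem.List.sorted cand (fun x => x) true with
      | nil => exact absurd ((PySem.List.sorted_eq_nil_iff cand (fun x => x) true).mp h) hne
      | cons a b => exact ⟨a, b, rfl⟩
    rw [hs]
    show _ = (rest.foldl pvScanStep (c0, 1, c0, 1)).1
    obtain ⟨r, hr, hrmode⟩ := pvA_mode cand default hne
    have hB := pvB_mode cand c0 rest hs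
    rw [hr]
    exact pvIsMode_unique hrmode hB
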